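-- pv_equiv track=rewrite | github.com/AstrBotDevs/AstrBot | astrbot-sdk/src/astrbot_sdk/_internal/memory_utils.py | normalize_memory_namespace
-- ===== SOURCE A (Python) =====
-- from typing import Any
--
-- def normalize_memory_namespace(value: Any) -> str:
--     """Normalize a namespace path into a stable slash-delimited string."""
--
--     if value is None:
--         return ""
--     if isinstance(value, (list, tuple)):
--         return join_memory_namespace(*value)
--     text = str(value).strip().replace("\\", "/")
--     if not text:
--         return ""
--     parts = [segment.strip() for segment in text.split("/") if segment.strip()]
--     return "/".join(parts)
--
-- def join_memory_namespace(*parts: Any) -> str: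
--     """Join namespace segments while preserving the root namespace as empty."""
--
--     normalized_parts: list[str] = []
--     for part in parts:
--         normalized = normalize_memory_namespace(part)
--         if not normalized:
--             continue
--         normalized_parts.extend(
--             segment for segment in normalized.split("/") if segment.strip()
--         )
--     return "/".join(normalized_parts)
-- ===== SOURCE B (Python) =====
-- def normalize_memory_namespace(value):
--     """Normalize a namespace path into a stable slash-delimited string.
--
--     Single character pass: '/' and '\\' are both treated as separators;
--     each collected segment is stripped and dropped if empty.
--     """
--     if value is None:
--         return ""
--     segments = []
--     cur = []
--     for ch in str(value):
--         if ch == "/" or ch == "\\":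
--             seg = "".join(cur).strip()
--             if seg:
--                 segments.append(seg)
--             cur = []
--         else:
--             cur.append(ch)
--     seg = "".join(cur).strip()
--     if seg:
--         segments.append(seg)
--     return "/".join(segments)
-- ===== Notes on version B (the rewrite author's own statement) =====
-- stated objective: alternative
-- what changed: Replaced the strip/replace/split/re-strip/join string-pipeline (with its recursion into join_memory_namespace for sequences) by a single left-to-right character pass that treats both slash and backslash as separators and flushes stripped non-empty segments into an accumulator.
import Mathlib
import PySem

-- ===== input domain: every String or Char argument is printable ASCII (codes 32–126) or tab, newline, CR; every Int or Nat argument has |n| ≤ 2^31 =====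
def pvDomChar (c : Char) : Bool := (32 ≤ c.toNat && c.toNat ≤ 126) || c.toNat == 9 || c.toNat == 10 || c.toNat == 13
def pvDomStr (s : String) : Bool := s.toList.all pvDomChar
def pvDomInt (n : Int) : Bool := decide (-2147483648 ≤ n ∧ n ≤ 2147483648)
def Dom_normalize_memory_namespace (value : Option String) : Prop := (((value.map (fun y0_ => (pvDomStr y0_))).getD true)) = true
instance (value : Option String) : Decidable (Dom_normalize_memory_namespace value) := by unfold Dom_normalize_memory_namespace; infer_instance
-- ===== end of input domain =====

-- B replaces A's strip/replace/split/re-strip/join pipeline by one character pass that treats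
-- slash and backslash as separators and flushes stripped non-empty segments (objective: alternative).

-- ===== PORT A =====
-- value : Option String, so A's list/tuple branch (join_memory_namespace) is never taken.
def normalize_memory_namespace (value : Option String) : String :=
  match value with
  | none => ""
  | some v =>
    let text := PySem.Str.replace (PySem.Str.strip v) "\\" "/"
    if text = "" then ""
    else
      let parts := (((PySem.Str.split? text "/").getD []).map PySem.Str.strip).filter
        (fun seg => seg ≠ "")
      PySem.Str.join "/" parts

-- ===== PORT B =====
-- flush: ''.join(cur).strip(); append if non-empty (the two flush sites of Source B)
def altFlush (st : List Char × List String) : List String :=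
  if PySem.Str.strip (String.ofList st.1) = "" then st.2
  else st.2 ++ [PySem.Str.strip (String.ofList st.1)]

-- one loop iteration of Source B's character pass
def altStep (st : List Char × List String) (ch : Char) : List Char × List String :=
  if ch == '/' || ch == '\\' then (([] : List Char), altFlush st)
  else (st.1 ++ [ch], st.2)

def normalize_memory_namespace_alt (value : Option String) : String :=
  match value with
  | none => ""
  | some v => PySem.Str.join "/" (altFlush (v.toList.foldl altStep ([], [])))

-- ===== PRECONDITION & SPEC =====
def Spec_normalize_memory_namespace (value : Option String) (out : String) : Prop := out = normalize_memory_namespace_alt value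
instance (value : Option String) (out : String) : Decidable (Spec_normalize_memory_namespace value out) := by unfold Spec_normalize_memory_namespace; infer_instance

-- ===== CLAIM (what is proved, stated in full; the proofs are below) =====
def Claim_equal_normalize_memory_namespace : Prop := ∀ (value : Option String), Dom_normalize_memory_namespace value → Spec_normalize_memory_namespace value (normalize_memory_namespace value)

-- ===== LEMMAS AND PROOFS =====

-- single-character replace '\' → '/' is a map
lemma replace_go_char (l : List Char) : ∀ (fuel : Nat) (acc : List Char), l.length ≤ fuel →
    PySem.Chars.replace.go ['\\'] ['/'] fuel l acc
      = acc.reverse ++ l.map (fun c => if c == '\\' then '/' else c) := by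
  induction l with
  | nil => intro fuel acc h; cases fuel <;> simp [PySem.Chars.replace.go]
  | cons c t ih =>
    intro fuel acc h
    cases fuel with
    | zero => simp at h
    | succ n =>
      simp only [PySem.Chars.replace.go]
      by_cases hc : c = '\\'
      · subst hc
        simp [List.isPrefixOf, ih n _ (by simpa using h)]
      · simp [List.isPrefixOf, hc, ih n _ (by simpa using h)]
        exact fun h' => (hc h'.symm).elim

lemma replace_bs (l : List Char) :
    PySem.Chars.replace l ['\\'] ['/'] = l.map (fun c => if c == '\\' then '/' else c) := by
  simp [PySem.Chars.replace, replace_go_char l l.length [] le_rfl]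

-- structural split on the single character '/'
def splitSpec : List Char → List Char → List (List Char)
  | [], cur => [cur]
  | c :: t, cur => if c = '/' then cur :: splitSpec t [] else splitSpec t (cur ++ [c])

lemma splitOn_go_char (l : List Char) : ∀ (fuel : Nat) (cur : List Char) (acc : List (List Char)),
    l.length ≤ fuel →
    PySem.Chars.splitOn.go ['/'] fuel l cur acc = acc.reverse ++ splitSpec l cur.reverse := by
  induction l with
  | nil => intro fuel cur acc h; cases fuel <;> simp [PySem.Chars.splitOn.go, splitSpec]
  | cons c t ih =>
    intro fuel cur acc h
    cases fuel with
    | zero => simp at h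
    | succ n =>
      simp only [PySem.Chars.splitOn.go]
      by_cases hc : c = '/'
      · subst hc
        simp [List.isPrefixOf, splitSpec, ih n _ _ (by simpa using h)]
      · simp [List.isPrefixOf, hc, splitSpec, ih n _ _ (by simpa using h)]
        exact fun h' => (hc h'.symm).elim

lemma splitOn_slash (l : List Char) :
    PySem.Chars.splitOn l ['/'] = splitSpec l [] := by
  simpa using splitOn_go_char l (l.length + 1) [] [] (by omega)

-- emit a stripped segment if non-empty
def emitSeg (cur : List Char) : List (List Char) :=
  if PySem.Chars.strip cur = [] then [] else [PySem.Chars.strip cur]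

-- reference semantics of B's pass, on characters
def segsB : List Char → List Char → List (List Char)
  | [], cur => emitSeg cur
  | c :: t, cur => if c = '/' ∨ c = '\\' then emitSeg cur ++ segsB t [] else segsB t (cur ++ [c])

-- A's pipeline equals segsB
lemma pipeline_eq_segsB (l : List Char) : ∀ cur : List Char,
    ((splitSpec (l.map (fun c => if c == '\\' then '/' else c)) cur).map PySem.Chars.strip).filter
        (fun s => s ≠ []) = segsB l cur := by
  induction l with
  | nil =>
    intro cur
    simp only [List.map_nil, splitSpec, segsB, List.map_cons, List.map_nil, List.filter,
      emitSeg]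
    split_ifs with h <;> simp_all
  | cons c t ih =>
    intro cur
    by_cases hc : c = '/' ∨ c = '\\'
    · have hmap : (if c == '\\' then '/' else c) = '/' := by
        rcases hc with h | h <;> simp [h]
      simp only [List.map_cons, hmap, splitSpec, segsB, if_pos hc, if_true]
      rw [List.filter_cons, ← ih []]
      unfold emitSeg
      split_ifs with h1 h2 h2 <;> simp_all
    · have hmap : (if c == '\\' then '/' else c) = c := by
        have : c ≠ '\\' := fun h => hc (Or.inr h)
        simp [this]
      have hc1 : c ≠ '/' := fun h => hc (Or.inl h)
      simp only [List.map_cons, hmap, splitSpec, if_neg hc1, segsB, if_neg hc]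
      exact ih (cur ++ [c])

lemma dropWhile_ws_nil {ws : List Char} (h : ∀ c ∈ ws, PySem.Chars.isspace c) :
    ws.dropWhile PySem.Chars.isspace = [] :=
  List.dropWhile_eq_nil_iff.mpr (by simpa using h)

lemma strip_ws_append {ws x : List Char} (h : ∀ c ∈ ws, PySem.Chars.isspace c) :
    PySem.Chars.strip (ws ++ x) = PySem.Chars.strip x := by
  simp [PySem.Chars.strip, PySem.Chars.lstrip, List.dropWhile_append, dropWhile_ws_nil h]

lemma strip_append_ws {x ws : List Char} (h : ∀ c ∈ ws, PySem.Chars.isspace c) :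
    PySem.Chars.strip (x ++ ws) = PySem.Chars.strip x := by
  by_cases hx : x.dropWhile PySem.Chars.isspace = []
  · have hall : ∀ c ∈ x, PySem.Chars.isspace c := by
      simpa using List.dropWhile_eq_nil_iff.mp hx
    have hboth : ∀ c ∈ x ++ ws, PySem.Chars.isspace c := by
      intro c hm; rcases List.mem_append.mp hm with h' | h'
      · exact hall c h'
      · exact h c h'
    simp [PySem.Chars.strip, PySem.Chars.lstrip, PySem.Chars.rstrip,
      dropWhile_ws_nil hboth, dropWhile_ws_nil hall]
  · simp only [PySem.Chars.strip, PySem.Chars.lstrip, List.dropWhile_append,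
      List.isEmpty_iff, if_neg hx]
    simp only [PySem.Chars.rstrip, List.reverse_append]
    rw [List.dropWhile_append, dropWhile_ws_nil (by simpa using h)]
    simp

lemma ws_not_sep {c : Char} (h : PySem.Chars.isspace c) : ¬ (c = '/' ∨ c = '\\') := by
  rintro (rfl | rfl) <;> simp [PySem.Chars.isspace] at h

lemma segsB_ws_cur (l : List Char) : ∀ (ws cur : List Char), (∀ c ∈ ws, PySem.Chars.isspace c) →
    segsB l (ws ++ cur) = segsB l cur := by
  induction l with
  | nil => intro ws cur h; simp [segsB, emitSeg, strip_ws_append h]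
  | cons c t ih =>
    intro ws cur h
    by_cases hc : c = '/' ∨ c = '\\'
    · simp [segsB, if_pos hc, emitSeg, strip_ws_append h]
    · simp only [segsB, if_neg hc, List.append_assoc]
      exact ih ws (cur ++ [c]) h

lemma segsB_all_ws (ws : List Char) : ∀ cur : List Char, (∀ c ∈ ws, PySem.Chars.isspace c) →
    segsB ws cur = emitSeg cur := by
  induction ws with
  | nil => intro cur _; rfl
  | cons c t ih =>
    intro cur h
    have hcs : PySem.Chars.isspace c := h c (by simp)
    simp only [segsB, if_neg (ws_not_sep hcs)]
    rw [ih (cur ++ [c]) (fun d hd => h d (by simp [hd]))]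
    unfold emitSeg
    rw [strip_append_ws (by simpa using hcs)]

lemma segsB_append_ws (l : List Char) : ∀ (ws cur : List Char), (∀ c ∈ ws, PySem.Chars.isspace c) →
    segsB (l ++ ws) cur = segsB l cur := by
  induction l with
  | nil => intro ws cur h; simpa [segsB] using segsB_all_ws ws cur h
  | cons c t ih =>
    intro ws cur h
    by_cases hc : c = '/' ∨ c = '\\'
    · simp only [List.cons_append, segsB, if_pos hc]
      rw [ih ws [] h]
    · simp only [List.cons_append, segsB, if_neg hc]
      exact ih ws (cur ++ [c]) h

lemma segsB_lstrip (v : List Char) :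
    segsB (PySem.Chars.lstrip v) [] = segsB v [] := by
  induction v with
  | nil => rfl
  | cons c t ih =>
    by_cases hcs : PySem.Chars.isspace c
    · simp only [PySem.Chars.lstrip, List.dropWhile_cons, hcs, if_true]
      rw [show (List.dropWhile PySem.Chars.isspace t) = PySem.Chars.lstrip t from rfl, ih]
      simp only [segsB, if_neg (ws_not_sep hcs)]
      simpa using (segsB_ws_cur t [c] [] (by simpa using hcs)).symm
    · simp [PySem.Chars.lstrip, hcs]

lemma segsB_strip (v : List Char) :
    segsB (PySem.Chars.strip v) [] = segsB v [] := by
  have hdecomp : PySem.Chars.rstrip (PySem.Chars.lstrip v) ++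
      ((PySem.Chars.lstrip v).reverse.takeWhile PySem.Chars.isspace).reverse
      = PySem.Chars.lstrip v := by
    conv_rhs => rw [← List.reverse_reverse (PySem.Chars.lstrip v),
      ← List.takeWhile_append_dropWhile (p := PySem.Chars.isspace)
        (l := (PySem.Chars.lstrip v).reverse)]
    simp only [PySem.Chars.rstrip, List.reverse_append]
  have hws : ∀ c ∈ ((PySem.Chars.lstrip v).reverse.takeWhile PySem.Chars.isspace).reverse,
      PySem.Chars.isspace c := by
    intro c hc
    exact List.mem_takeWhile_imp (by simpa using hc)
  calc segsB (PySem.Chars.strip v) []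
      = segsB (PySem.Chars.rstrip (PySem.Chars.lstrip v)) [] := rfl
    _ = segsB (PySem.Chars.rstrip (PySem.Chars.lstrip v) ++
          ((PySem.Chars.lstrip v).reverse.takeWhile PySem.Chars.isspace).reverse) [] :=
        (segsB_append_ws _ _ [] hws).symm
    _ = segsB (PySem.Chars.lstrip v) [] := by rw [hdecomp]
    _ = segsB v [] := segsB_lstrip v

-- B's fold computes segsB
lemma ofList_strip_ne {cur : List Char} (h : ¬ PySem.Chars.strip cur = []) :
    ¬ PySem.Str.strip (String.ofList cur) = "" := by
  intro hh
  exact h (String.ofList_eq_empty_iff.mp (by simpa [PySem.Str.strip] using hh))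

lemma flush_eq_emit (cur : List Char) (segs : List String) :
    altFlush (cur, segs) = segs ++ (emitSeg cur).map String.ofList := by
  unfold altFlush emitSeg
  by_cases h : PySem.Chars.strip cur = []
  · simp [PySem.Str.strip, h]
  · rw [if_neg (ofList_strip_ne h), if_neg h]
    simp [PySem.Str.strip]

lemma fold_eq_segsB (l : List Char) : ∀ (cur : List Char) (segs : List String),
    altFlush (l.foldl altStep (cur, segs)) = segs ++ (segsB l cur).map String.ofList := by
  induction l with
  | nil => intro cur segs; simpa [segsB] using flush_eq_emit cur segs
  | cons c t ih =>
    intro cur segs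
    by_cases hc : c = '/' ∨ c = '\\'
    · have hb : (c == '/' || c == '\\') = true := by
        rcases hc with h | h <;> simp [h]
      rw [List.foldl_cons, show altStep (cur, segs) c = (([] : List Char), altFlush (cur, segs))
        from by unfold altStep; rw [if_pos hb]]
      rw [ih, flush_eq_emit]
      simp [segsB, if_pos hc]
    · have hb : (c == '/' || c == '\\') = false := by
        rcases (not_or.mp hc) with ⟨h1, h2⟩; simp [h1, h2]
      rw [List.foldl_cons, show altStep (cur, segs) c = (cur ++ [c], segs)
        from by unfold altStep; rw [hb]; rfl]
      rw [ih]
      simp [segsB, if_neg hc]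

lemma alt_some (v : String) :
    normalize_memory_namespace_alt (some v)
      = String.ofList (PySem.Chars.join ['/'] (segsB v.toList [])) := by
  show PySem.Str.join "/" (altFlush (v.toList.foldl altStep ([], []))) = _
  rw [fold_eq_segsB v.toList [] []]
  simp [PySem.Str.join, PySem.Chars.join, List.map_map, Function.comp_def]

lemma a_some (v : String) :
    normalize_memory_namespace (some v)
      = String.ofList (PySem.Chars.join ['/'] (segsB v.toList [])) := by
  have htext : PySem.Str.replace (PySem.Str.strip v) "\\" "/"
      = String.ofList ((PySem.Chars.strip v.toList).map (fun c => if c == '\\' then '/' else c)) := by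
    simp [PySem.Str.replace, PySem.Str.strip, replace_bs]
  show (if PySem.Str.replace (PySem.Str.strip v) "\\" "/" = "" then "" else
      PySem.Str.join "/" ((((PySem.Str.split?
          (PySem.Str.replace (PySem.Str.strip v) "\\" "/") "/").getD []).map
            PySem.Str.strip).filter (fun seg => seg ≠ ""))) = _
  rw [htext]
  by_cases h0 : (PySem.Chars.strip v.toList).map (fun c => if c == '\\' then '/' else c) = []
  · rw [if_pos (by rw [h0])]
    have hs : PySem.Chars.strip v.toList = [] := List.map_eq_nil_iff.mp h0
    rw [← segsB_strip, hs]
    simp [segsB, emitSeg, PySem.Chars.strip, PySem.Chars.lstrip, PySem.Chars.rstrip,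
      PySem.Chars.join, List.intercalate]
  · rw [if_neg (by simpa [String.ofList_eq_empty_iff] using h0)]
    have hsplit : PySem.Str.split? (String.ofList
        ((PySem.Chars.strip v.toList).map (fun c => if c == '\\' then '/' else c))) "/"
        = some ((splitSpec ((PySem.Chars.strip v.toList).map
            (fun c => if c == '\\' then '/' else c)) []).map String.ofList) := by
      simp [PySem.Str.split?, PySem.Chars.split?, splitOn_slash]
    rw [hsplit, Option.getD_some, List.map_map]
    have hcomp : (PySem.Str.strip ∘ String.ofList)
        = fun x : List Char => String.ofList (PySem.Chars.strip x) := by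
      funext x; simp [PySem.Str.strip]
    rw [hcomp, List.filter_map]
    have hpred : ((fun seg : String => decide (seg ≠ "")) ∘
        fun x : List Char => String.ofList (PySem.Chars.strip x))
        = fun x : List Char => decide (PySem.Chars.strip x ≠ []) := by
      funext x; simp [String.ofList_eq_empty_iff]
    rw [hpred]
    have hswap : ((splitSpec ((PySem.Chars.strip v.toList).map
          (fun c => if c == '\\' then '/' else c)) []).filter
          (fun x => decide (PySem.Chars.strip x ≠ []))).map PySem.Chars.strip
        = ((splitSpec ((PySem.Chars.strip v.toList).map
            (fun c => if c == '\\' then '/' else c)) []).map PySem.Chars.strip).filter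
          (fun s => decide (s ≠ [])) := by
      rw [List.filter_map]; simp [Function.comp_def]
    have hks : ((splitSpec ((PySem.Chars.strip v.toList).map
          (fun c => if c == '\\' then '/' else c)) []).filter
            (fun x => decide (PySem.Chars.strip x ≠ []))).map
          (fun x : List Char => String.ofList (PySem.Chars.strip x))
        = (segsB v.toList []).map String.ofList := by
      rw [show (fun x : List Char => String.ofList (PySem.Chars.strip x))
          = String.ofList ∘ PySem.Chars.strip from rfl, ← List.map_map, hswap]
      rw [pipeline_eq_segsB (PySem.Chars.strip v.toList) [], segsB_strip]
    rw [hks]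
    simp [PySem.Str.join, PySem.Chars.join, List.map_map, Function.comp_def]

-- ===== VERDICT (by name: the statement is the Claim_ definition above) =====
theorem normalize_memory_namespace_spec : Claim_equal_normalize_memory_namespace := by
  intro value _
  unfold Spec_normalize_memory_namespace
  cases value with
  | none => rfl
  | some v => rw [a_some, alt_some]
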